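-- pv_equiv track=rewrite | github.com/Duudiiss/Python2-exerc-cios- | T2da33Cem232/SOLUCAO/T2_33C_DIC_solucao20232_33C.py | criaDic
-- ===== SOURCE A (Python) =====
-- def criaDic(dAtiv):
--     dProf={}
--     for ativ, dProfLDiaHora in dAtiv.items():
--         for prof, lDiaHora in dProfLDiaHora.items():
--             dzinhoDoProf= dProf.get(prof,{})
--             for dia,hora in lDiaHora:
--                 if hora < 18: # maioria não deve testar: so observar
--                     dzinhoDoProf[ativ]= dzinhoDoProf.get(ativ,0)+1
--             if len(dzinhoDoProf)!=0:
--                 dProf[prof]= dzinhoDoProf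
--     return dProf
-- ===== SOURCE B (Python) =====
-- def criaDic(dAtiv):
--     # Pass 1: flat counter keyed by (prof, ativ) over all qualifying (hora < 18) entries.
--     cont = {}
--     for ativ, dProfLDiaHora in dAtiv.items():
--         for prof, lDiaHora in dProfLDiaHora.items():
--             for dia, hora in lDiaHora:
--                 if hora < 18:
--                     chave = (prof, ativ)
--                     cont[chave] = cont.get(chave, 0) + 1
--     # Pass 2: regroup the flat table into the nested result.
--     dProf = {}
--     for (prof, ativ), c in cont.items():
--         dProf.setdefault(prof, {})[ativ] = c
--     return dProf
-- ===== Notes on version B (the rewrite author's own statement) =====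
-- stated objective: alternative
-- what changed: A builds the nested professor dict in one pass, mutating each professor's sub-dict in place under a non-empty guard; B first accumulates a flat counter keyed by (prof, ativ) pairs over all qualifying entries, then regroups that table into the nested dict in a separate second pass.
import Mathlib
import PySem

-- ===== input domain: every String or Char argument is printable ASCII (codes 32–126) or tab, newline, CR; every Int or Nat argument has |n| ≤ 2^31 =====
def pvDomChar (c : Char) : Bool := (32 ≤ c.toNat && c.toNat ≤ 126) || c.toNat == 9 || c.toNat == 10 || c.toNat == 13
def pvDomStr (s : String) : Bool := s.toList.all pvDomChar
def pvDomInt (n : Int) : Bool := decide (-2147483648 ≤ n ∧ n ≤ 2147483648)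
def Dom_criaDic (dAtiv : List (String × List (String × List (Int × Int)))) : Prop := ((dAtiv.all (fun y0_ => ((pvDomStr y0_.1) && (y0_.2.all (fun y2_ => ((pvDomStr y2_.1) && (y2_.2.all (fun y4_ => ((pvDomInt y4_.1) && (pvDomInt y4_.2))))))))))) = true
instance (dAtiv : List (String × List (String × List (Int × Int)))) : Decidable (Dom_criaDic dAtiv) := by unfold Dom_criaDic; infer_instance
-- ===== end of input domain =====

-- B replaces A's nested build-and-mutate pass by a flat counter over qualifying entries followed
-- by a separate regroup pass (alternative decomposition; same asymptotic cost).

-- ===== PORT A =====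
-- inner 'for dia,hora in lDiaHora' loop of A
def innA (ativ : String) (dz : PySem.Dict String Int) (l : List (Int × Int)) :
    PySem.Dict String Int :=
  l.foldl (fun dz dh => if dh.2 < 18 then dz.insert ativ (dz.getD ativ 0 + 1) else dz) dz

-- middle 'for prof, lDiaHora in dProfLDiaHora.items()' loop of A
def midA (ativ : String) (r : PySem.Dict String (PySem.Dict String Int))
    (lp : List (String × List (Int × Int))) : PySem.Dict String (PySem.Dict String Int) :=
  lp.foldl (fun r q =>
    let dz := innA ativ (r.getD q.1 PySem.Dict.empty) q.2
    if dz.size ≠ 0 then r.insert q.1 dz else r) r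

def criaDic (dAtiv : List (String × List (String × List (Int × Int)))) :
    List (String × List (String × Int)) :=
  ((dAtiv.foldl (fun r p => midA p.1 r p.2) PySem.Dict.empty).items.map
    (fun p => (p.1, p.2.items)))

-- ===== PORT B =====
-- pass 1 of B: flat counter keyed by (prof, ativ) over all qualifying entries
def cntB (dAtiv : List (String × List (String × List (Int × Int)))) :
    PySem.Dict (String × String) Int :=
  dAtiv.foldl (fun c p =>
    p.2.foldl (fun c q =>
      q.2.foldl (fun c dh =>
        if dh.2 < 18 then c.insert (q.1, p.1) (c.getD (q.1, p.1) 0 + 1) else c) c) c)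
    PySem.Dict.empty

def criaDic_alt (dAtiv : List (String × List (String × List (Int × Int)))) :
    List (String × List (String × Int)) :=
  -- pass 2 of B: regroup the flat table into the nested result
  (((cntB dAtiv).items.foldl (fun dP kv =>
      dP.insert kv.1.1 ((dP.getD kv.1.1 PySem.Dict.empty).insert kv.1.2 kv.2))
    PySem.Dict.empty).items.map (fun p => (p.1, p.2.items)))

-- ===== PRECONDITION & SPEC =====
def Spec_criaDic (dAtiv : List (String × List (String × List (Int × Int)))) (out : List (String × List (String × Int))) : Prop := out = criaDic_alt dAtiv
instance (dAtiv : List (String × List (String × List (Int × Int)))) (out : List (String × List (String × Int))) : Decidable (Spec_criaDic dAtiv out) := by unfold Spec_criaDic; infer_instance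

-- ===== CLAIM (what is proved, stated in full; the proofs are below) =====
def Claim_equal_criaDic : Prop := ∀ (dAtiv : List (String × List (String × List (Int × Int)))), Dom_criaDic dAtiv → Spec_criaDic dAtiv (criaDic dAtiv)

-- ===== LEMMAS AND PROOFS =====

-- the stream of qualifying (prof, ativ) events, in A's traversal order
def evGroup (prof ativ : String) (l : List (Int × Int)) : List (String × String) :=
  (l.filter (fun dh => dh.2 < 18)).map (fun _ => (prof, ativ))

def ev (dAtiv : List (String × List (String × List (Int × Int)))) : List (String × String) :=
  dAtiv.flatMap (fun p => p.2.flatMap (fun q => evGroup q.1 p.1 q.2))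

-- one event applied to the nested dictionary
def stepE (r : PySem.Dict String (PySem.Dict String Int)) (e : String × String) :
    PySem.Dict String (PySem.Dict String Int) :=
  r.insert e.1 ((r.getD e.1 PySem.Dict.empty).insert e.2
    ((r.getD e.1 PySem.Dict.empty).getD e.2 0 + 1))

-- one event applied to the flat counter
def stepC (c : PySem.Dict (String × String) Int) (e : String × String) :
    PySem.Dict (String × String) Int :=
  c.insert e (c.getD e 0 + 1)

-- one counter item applied in B's regroup pass
def stepR (dP : PySem.Dict String (PySem.Dict String Int)) (kv : (String × String) × Int) :
    PySem.Dict String (PySem.Dict String Int) :=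
  dP.insert kv.1.1 ((dP.getD kv.1.1 PySem.Dict.empty).insert kv.1.2 kv.2)

-- canonical closed form of the result, as a function of the event stream
def innerItems (es : List (String × String)) (p : String) : List (String × Int) :=
  ((PySem.Set.ofList es).filter (fun e => e.1 == p)).map (fun e => (e.2, (es.count e : Int)))

def innerD (es : List (String × String)) (p : String) : PySem.Dict String Int :=
  PySem.Dict.mk (innerItems es p)

def canonD (es : List (String × String)) : PySem.Dict String (PySem.Dict String Int) :=
  PySem.Dict.mk ((PySem.Set.ofList (es.map Prod.fst)).map (fun p => (p, innerD es p)))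

-- dictionaries with nonempty values and distinct keys (A's loop invariant)
def GoodA (r : PySem.Dict String (PySem.Dict String Int)) : Prop :=
  (∀ p, r.contains p = true → (r.getD p PySem.Dict.empty).size ≠ 0) ∧ r.keys.Nodup

theorem contains_size_ne {κ ν : Type} [BEq κ] (d : PySem.Dict κ ν) (k : κ)
    (h : d.contains k = true) : d.size ≠ 0 := by
  intro h0
  unfold PySem.Dict.contains at h
  rcases List.any_eq_true.mp h with ⟨p, hp, _⟩
  have : d.items = [] := List.length_eq_zero_iff.mp h0
  simp [this] at hp

theorem insert_getD_self (d : PySem.Dict String (PySem.Dict String Int)) (k : String)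
    (h : d.contains k = true) (hnd : d.keys.Nodup) :
    d.insert k (d.getD k PySem.Dict.empty) = d := by
  apply PySem.Dict.ext
  rw [PySem.Dict.items_insert_of_contains _ _ h]
  conv_rhs => rw [← List.map_id d.items]
  apply List.map_congr_left
  intro q hq
  by_cases hk : q.1 = k
  · subst hk
    have := PySem.Dict.getD_of_mem_items d (k := q.1) (v := q.2) hq hnd PySem.Dict.empty
    simp [this]
  · simp [hk]

theorem innA_size_ne (ativ : String) (l : List (Int × Int)) (dz : PySem.Dict String Int)
    (h : dz.size ≠ 0) : (innA ativ dz l).size ≠ 0 := by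
  induction l generalizing dz with
  | nil => exact h
  | cons dh l ih =>
    simp only [innA, List.foldl_cons]
    split
    · apply ih
      rw [PySem.Dict.size_insert]
      split <;> omega
    · exact ih _ h

theorem stepE_good (r : PySem.Dict String (PySem.Dict String Int)) (e : String × String)
    (h : GoodA r) : GoodA (stepE r e) := by
  obtain ⟨h1, h2⟩ := h
  constructor
  · intro p hp
    simp only [stepE] at hp ⊢
    by_cases hpe : p = e.1
    · subst hpe
      rw [PySem.Dict.getD_insert_self]
      exact contains_size_ne _ e.2 (PySem.Dict.contains_insert_self _ _ _)
    · rw [PySem.Dict.getD_insert_of_ne _ _ _ hpe]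
      apply h1
      rw [PySem.Dict.contains_insert] at hp
      simpa [hpe] using hp
  · exact PySem.Dict.nodup_keys_insert _ _ _ h2

theorem foldE_good (es : List (String × String)) (r : PySem.Dict String (PySem.Dict String Int))
    (h : GoodA r) : GoodA (es.foldl stepE r) := by
  induction es generalizing r with
  | nil => exact h
  | cons e es ih => exact ih _ (stepE_good _ _ h)

theorem G2 (prof ativ : String) (l : List (Int × Int))
    (r : PySem.Dict String (PySem.Dict String Int)) (dz : PySem.Dict String Int)
    (h : dz.size ≠ 0) :
    r.insert prof (innA ativ dz l) = (evGroup prof ativ l).foldl stepE (r.insert prof dz) := by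
  induction l generalizing r dz with
  | nil => rfl
  | cons dh l ih =>
    simp only [innA, evGroup, List.foldl_cons, List.filter_cons]
    by_cases hq : dh.2 < 18
    · simp only [hq, if_true, decide_true, List.map_cons, List.foldl_cons]
      have hstep : stepE (r.insert prof dz) (prof, ativ)
          = r.insert prof (dz.insert ativ (dz.getD ativ 0 + 1)) := by
        simp [stepE, PySem.Dict.getD_insert_self, PySem.Dict.insert_insert_self]
      rw [hstep]
      exact ih _ _ (by
        apply contains_size_ne _ ativ
        exact PySem.Dict.contains_insert_self _ _ _)
    · simp only [hq, if_false, decide_false]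
      exact ih _ _ h

theorem G1 (prof ativ : String) (l : List (Int × Int))
    (r : PySem.Dict String (PySem.Dict String Int)) (h : GoodA r) :
    (let dz := innA ativ (r.getD prof PySem.Dict.empty) l;
     if dz.size ≠ 0 then r.insert prof dz else r) = (evGroup prof ativ l).foldl stepE r := by
  induction l generalizing r with
  | nil =>
    simp only [innA, evGroup, List.foldl_nil, List.filter_nil, List.map_nil]
    split
    · rename_i hs
      by_cases hc : r.contains prof = true
      · exact insert_getD_self _ _ hc h.2
      · exfalso
        rw [PySem.Dict.getD_of_not_contains _ _ (by simpa using hc)] at hs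
        exact hs rfl
    · rfl
  | cons dh l ih =>
    by_cases hq : dh.2 < 18
    · simp only [innA, evGroup, List.foldl_cons, List.filter_cons, hq, decide_true,
        if_true, List.map_cons]
      have hne : ((r.getD prof PySem.Dict.empty).insert ativ
          ((r.getD prof PySem.Dict.empty).getD ativ 0 + 1)).size ≠ 0 := by
        apply contains_size_ne _ ativ
        exact PySem.Dict.contains_insert_self _ _ _
      have hsz := innA_size_ne ativ l _ hne
      rw [if_pos (by simpa [innA] using hsz)]
      have := G2 prof ativ l r _ hne
      simp only [innA] at this ⊢
      rw [this]
      rfl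
    · simp only [innA, evGroup, List.foldl_cons, List.filter_cons, hq, decide_false,
        if_false]
      exact ih r h

theorem midA_eq (ativ : String) (lp : List (String × List (Int × Int)))
    (r : PySem.Dict String (PySem.Dict String Int)) (h : GoodA r) :
    midA ativ r lp = (lp.flatMap (fun q => evGroup q.1 ativ q.2)).foldl stepE r := by
  induction lp generalizing r with
  | nil => rfl
  | cons q lp ih =>
    simp only [midA, List.foldl_cons, List.flatMap_cons, List.foldl_append]
    rw [show (let dz := innA ativ (r.getD q.1 PySem.Dict.empty) q.2;
        if dz.size ≠ 0 then r.insert q.1 dz else r)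
      = (evGroup q.1 ativ q.2).foldl stepE r from G1 q.1 ativ q.2 r h]
    exact ih _ (foldE_good _ _ h)

theorem foldA_eq (dAtiv : List (String × List (String × List (Int × Int))))
    (r : PySem.Dict String (PySem.Dict String Int)) (h : GoodA r) :
    dAtiv.foldl (fun r p => midA p.1 r p.2) r = (ev dAtiv).foldl stepE r := by
  induction dAtiv generalizing r with
  | nil => rfl
  | cons p rest ih =>
    simp only [ev, List.foldl_cons, List.flatMap_cons, List.foldl_append]
    rw [midA_eq p.1 p.2 r h]
    exact ih _ (foldE_good _ _ h)

-- canonical-form facts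
theorem keys_canonD (es : List (String × String)) :
    (canonD es).keys = PySem.Set.ofList (es.map Prod.fst) := by
  simp [canonD, PySem.Dict.keys, Function.comp_def]

theorem nodup_keys_canonD (es : List (String × String)) : (canonD es).keys.Nodup := by
  rw [keys_canonD]; exact PySem.Set.nodup_ofList _

theorem getD_canonD_mem (es : List (String × String)) (p : String)
    (hp : p ∈ es.map Prod.fst) :
    (canonD es).getD p PySem.Dict.empty = innerD es p := by
  refine PySem.Dict.getD_of_mem_items _ ?_ (nodup_keys_canonD es) _
  exact List.mem_map_of_mem ((PySem.Set.mem_ofList _ _).mpr hp)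

theorem contains_canonD (es : List (String × String)) (p : String) :
    (canonD es).contains p = true ↔ p ∈ es.map Prod.fst := by
  rw [PySem.Dict.contains_iff_mem_keys, keys_canonD, PySem.Set.mem_ofList]

theorem getD_canonD_not (es : List (String × String)) (p : String)
    (hp : p ∉ es.map Prod.fst) :
    (canonD es).getD p PySem.Dict.empty = PySem.Dict.empty := by
  refine PySem.Dict.getD_of_not_contains _ _ ?_
  cases h : (canonD es).contains p
  · rfl
  · exact absurd ((contains_canonD es p).mp h) hp

theorem nodup_keys_innerD (es : List (String × String)) (p : String) :
    (innerD es p).keys.Nodup := by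
  simp only [innerD, PySem.Dict.keys, innerItems, List.map_map]
  refine List.Nodup.map_on ?_ ((PySem.Set.nodup_ofList es).filter _)
  intro x hx y hy hxy
  have hx1 : x.1 = p := by simpa using (List.mem_filter.mp hx).2
  have hy1 : y.1 = p := by simpa using (List.mem_filter.mp hy).2
  have hxy2 : x.2 = y.2 := by simpa [Function.comp] using hxy
  exact Prod.ext_iff.mpr ⟨hx1.trans hy1.symm, hxy2⟩

theorem contains_inner (es : List (String × String)) (p a : String) :
    (innerD es p).contains a = true ↔ (p, a) ∈ es := by
  rw [PySem.Dict.contains_iff_mem_keys]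
  simp only [innerD, PySem.Dict.keys, innerItems, List.map_map]
  constructor
  · intro hm
    rcases List.mem_map.mp hm with ⟨x, hx, hxa⟩
    obtain ⟨hxS, hx1b⟩ := List.mem_filter.mp hx
    have hx1 : x.1 = p := by simpa using hx1b
    have hx2 : x.2 = a := by simpa [Function.comp] using hxa
    have hxe : x ∈ es := (PySem.Set.mem_ofList _ _).mp hxS
    rwa [show x = (p, a) from Prod.ext_iff.mpr ⟨hx1, hx2⟩] at hxe
  · intro hm
    refine List.mem_map.mpr ⟨(p, a), List.mem_filter.mpr ⟨(PySem.Set.mem_ofList _ _).mpr hm, by simp⟩, rfl⟩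

theorem getD_inner_mem (es : List (String × String)) (p a : String) (h : (p, a) ∈ es) :
    (innerD es p).getD a 0 = (es.count (p, a) : Int) := by
  refine PySem.Dict.getD_of_mem_items _ ?_ (nodup_keys_innerD es p) _
  simp only [innerD, innerItems]
  refine List.mem_map.mpr ⟨(p, a), List.mem_filter.mpr ⟨(PySem.Set.mem_ofList _ _).mpr h, by simp⟩, rfl⟩

theorem contains_inner_false (es : List (String × String)) (p a : String)
    (h : (p, a) ∉ es) : (innerD es p).contains a = false := by
  cases hc : (innerD es p).contains a
  · rfl
  · exact absurd ((contains_inner es p a).mp hc) h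

theorem getD_inner_not (es : List (String × String)) (p a : String) (h : (p, a) ∉ es) :
    (innerD es p).getD a 0 = 0 :=
  PySem.Dict.getD_of_not_contains _ _ (contains_inner_false es p a h)

theorem count_append_ne (es : List (String × String)) (e x : String × String)
    (hne : x ≠ e) : (es ++ [e]).count x = es.count x := by
  have h0 : List.count x [e] = 0 := List.count_eq_zero.mpr (by intro hc; exact hne (List.mem_singleton.mp hc))
  simp [List.count_append, h0]

theorem filter_add_ne (es : List (String × String)) (e : String × String) (p' : String)
    (hne : p' ≠ e.1) :
    (PySem.Set.add (PySem.Set.ofList es) e).filter (fun x => x.1 == p')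
      = (PySem.Set.ofList es).filter (fun x => x.1 == p') := by
  rw [PySem.Set.add_eq_ite]
  split
  · rfl
  · rw [List.filter_append]
    have : (e.1 == p') = false := beq_eq_false_iff_ne.mpr (Ne.symm hne)
    simp [this]

theorem innerD_append_ne (es : List (String × String)) (e : String × String) (p' : String)
    (hne : p' ≠ e.1) : innerD (es ++ [e]) p' = innerD es p' := by
  apply PySem.Dict.ext
  simp only [innerD, innerItems]
  rw [PySem.Set.ofList_append_singleton, filter_add_ne es e p' hne]
  apply List.map_congr_left
  intro x hx
  obtain ⟨hxS, hx1b⟩ := List.mem_filter.mp hx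
  have hx1 : x.1 = p' := by simpa using hx1b
  have hxe : x ≠ e := fun hc => hne (by rw [← hc]; exact hx1.symm)
  rw [count_append_ne es e x hxe]

theorem innerD_empty (es : List (String × String)) (p : String)
    (hp : p ∉ es.map Prod.fst) : innerD es p = PySem.Dict.empty := by
  apply PySem.Dict.ext
  simp only [innerD, innerItems]
  rw [List.filter_eq_nil_iff.mpr ?_]
  · rfl
  · intro x hxS
    have hxe : x ∈ es := (PySem.Set.mem_ofList _ _).mp hxS
    simp only [beq_iff_eq]
    intro hx1
    exact hp (List.mem_map.mpr ⟨x, hxe, hx1⟩)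

theorem inner_step (es : List (String × String)) (p a : String) :
    (innerD es p).insert a ((innerD es p).getD a 0 + 1) = innerD (es ++ [(p, a)]) p := by
  by_cases hm : (p, a) ∈ es
  · rw [getD_inner_mem es p a hm]
    apply PySem.Dict.ext
    rw [PySem.Dict.items_insert_of_contains _ _ ((contains_inner es p a).mpr hm)]
    simp only [innerD, innerItems]
    rw [PySem.Set.ofList_append_singleton,
      PySem.Set.add_of_mem ((PySem.Set.mem_ofList _ _).mpr hm), List.map_map]
    apply List.map_congr_left
    intro x hx
    obtain ⟨hxS, hx1b⟩ := List.mem_filter.mp hx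
    have hx1 : x.1 = p := by simpa using hx1b
    by_cases hxa : x.2 = a
    · have hxe : x = (p, a) := Prod.ext_iff.mpr ⟨hx1, hxa⟩
      subst hxe
      simp [List.count_append]
    · have hxe : x ≠ (p, a) := fun hc => hxa (by rw [hc])
      have : (x.2 == a) = false := beq_eq_false_iff_ne.mpr hxa
      simp only [Function.comp_apply, this, Bool.false_eq_true, if_false]
      rw [count_append_ne es (p, a) x hxe]
  · rw [getD_inner_not es p a hm]
    apply PySem.Dict.ext
    rw [PySem.Dict.items_insert_of_not_contains _ _ (contains_inner_false es p a hm)]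
    simp only [innerD, innerItems]
    rw [PySem.Set.ofList_append_singleton,
      PySem.Set.add_of_not_mem (fun hc => hm ((PySem.Set.mem_ofList _ _).mp hc)),
      List.filter_append, show ([((p : String), (a : String))] : List (String × String)).filter
        (fun x => x.1 == p) = [(p, a)] from by simp, List.map_append]
    congr 1
    · apply List.map_congr_left
      intro x hx
      obtain ⟨hxS, _⟩ := List.mem_filter.mp hx
      have hxe : x ∈ es := (PySem.Set.mem_ofList _ _).mp hxS
      have hxne : x ≠ (p, a) := fun hc => hm (hc ▸ hxe)
      rw [count_append_ne es (p, a) x hxne]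
    · have h0 : List.count (p, a) es = 0 := List.count_eq_zero.mpr hm
      simp [List.count_append, h0]

theorem foldE_canon (es : List (String × String)) :
    es.foldl stepE PySem.Dict.empty = canonD es := by
  induction es using List.reverseRecOn with
  | nil => rfl
  | append_singleton es e ih =>
    obtain ⟨p, a⟩ := e
    rw [List.foldl_append, List.foldl_cons, List.foldl_nil, ih]
    by_cases hp : p ∈ es.map Prod.fst
    · simp only [stepE]
      rw [getD_canonD_mem es p hp, inner_step es p a]
      apply PySem.Dict.ext
      rw [PySem.Dict.items_insert_of_contains _ _ ((contains_canonD es p).mpr hp)]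
      simp only [canonD]
      rw [show PySem.Set.ofList ((es ++ [(p, a)]).map Prod.fst)
          = PySem.Set.ofList (es.map Prod.fst) from by
        simp only [List.map_append, List.map_cons, List.map_nil]
        rw [PySem.Set.ofList_append_singleton (es.map Prod.fst) p,
          PySem.Set.add_of_mem ((PySem.Set.mem_ofList _ _).mpr hp)], List.map_map]
      apply List.map_congr_left
      intro p' hp'
      by_cases hpp : p' = p
      · subst hpp
        simp
      · have : ((p', innerD es p').1 == p) = false := beq_eq_false_iff_ne.mpr hpp
        simp only [Function.comp_apply, this, Bool.false_eq_true, if_false]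
        rw [innerD_append_ne es (p, a) p' hpp]
    · simp only [stepE]
      rw [getD_canonD_not es p hp, ← innerD_empty es p hp, inner_step es p a]
      apply PySem.Dict.ext
      rw [PySem.Dict.items_insert_of_not_contains _ _ (by
        cases hc : (canonD es).contains p
        · rfl
        · exact absurd ((contains_canonD es p).mp hc) hp)]
      simp only [canonD]
      rw [show PySem.Set.ofList ((es ++ [(p, a)]).map Prod.fst)
          = PySem.Set.ofList (es.map Prod.fst) ++ [p] from by
        simp only [List.map_append, List.map_cons, List.map_nil]
        rw [PySem.Set.ofList_append_singleton (es.map Prod.fst) p,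
          PySem.Set.add_of_not_mem (fun hc => hp ((PySem.Set.mem_ofList _ _).mp hc))],
        List.map_append]
      congr 1
      apply List.map_congr_left
      intro p' hp'
      have hp'm : p' ∈ es.map Prod.fst := (PySem.Set.mem_ofList _ _).mp hp'
      have hpp : p' ≠ p := fun hc => hp (hc ▸ hp'm)
      rw [innerD_append_ne es (p, a) p' hpp]

-- B side
theorem cntB_eq (dAtiv : List (String × List (String × List (Int × Int)))) :
    cntB dAtiv = PySem.Dict.counter (ev dAtiv) := by
  rw [← PySem.Dict.foldl_insert_getD_add_one_eq_counter]
  show cntB dAtiv = (ev dAtiv).foldl stepC PySem.Dict.empty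
  unfold cntB ev
  generalize PySem.Dict.empty = c
  induction dAtiv generalizing c with
  | nil => rfl
  | cons p rest ih =>
    simp only [List.foldl_cons, List.flatMap_cons, List.foldl_append]
    rw [show (p.2.foldl (fun c q => q.2.foldl (fun c dh =>
        if dh.2 < 18 then c.insert (q.1, p.1) (c.getD (q.1, p.1) 0 + 1) else c) c) c)
      = (p.2.flatMap fun q => evGroup q.1 p.1 q.2).foldl stepC c from ?_]
    · exact ih _
    · generalize p.2 = lp
      induction lp generalizing c with
      | nil => rfl
      | cons q lq ihq =>
        simp only [List.foldl_cons, List.flatMap_cons, List.foldl_append]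
        rw [show (q.2.foldl (fun c dh =>
            if dh.2 < 18 then c.insert (q.1, p.1) (c.getD (q.1, p.1) 0 + 1) else c) c)
          = (evGroup q.1 p.1 q.2).foldl stepC c from ?_]
        · exact ihq _
        · generalize q.2 = l
          induction l generalizing c with
          | nil => rfl
          | cons dh l ihl =>
            simp only [List.foldl_cons, evGroup, List.filter_cons]
            by_cases hq : dh.2 < 18
            · simp only [hq, decide_true, if_true, List.map_cons, List.foldl_cons]
              exact ihl _
            · simp only [hq, decide_false, if_false]
              exact ihl _

def rgInner (L : List ((String × String) × Int)) (p : String) : PySem.Dict String Int :=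
  PySem.Dict.mk ((L.filter (fun kv => kv.1.1 == p)).map (fun kv => (kv.1.2, kv.2)))

def rgD (L : List ((String × String) × Int)) : PySem.Dict String (PySem.Dict String Int) :=
  PySem.Dict.mk ((PySem.Set.ofList (L.map (fun kv => kv.1.1))).map (fun p => (p, rgInner L p)))

theorem keys_rgD (L : List ((String × String) × Int)) :
    (rgD L).keys = PySem.Set.ofList (L.map (fun kv => kv.1.1)) := by
  simp [rgD, PySem.Dict.keys, Function.comp_def]

theorem nodup_keys_rgD (L : List ((String × String) × Int)) : (rgD L).keys.Nodup := by
  rw [keys_rgD]; exact PySem.Set.nodup_ofList _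

theorem contains_rgD (L : List ((String × String) × Int)) (p : String) :
    (rgD L).contains p = true ↔ p ∈ L.map (fun kv => kv.1.1) := by
  rw [PySem.Dict.contains_iff_mem_keys, keys_rgD, PySem.Set.mem_ofList]

theorem getD_rgD_mem (L : List ((String × String) × Int)) (p : String)
    (hp : p ∈ L.map (fun kv => kv.1.1)) :
    (rgD L).getD p PySem.Dict.empty = rgInner L p := by
  refine PySem.Dict.getD_of_mem_items _ ?_ (nodup_keys_rgD L) _
  exact List.mem_map_of_mem ((PySem.Set.mem_ofList _ _).mpr hp)

theorem getD_rgD_not (L : List ((String × String) × Int)) (p : String)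
    (hp : p ∉ L.map (fun kv => kv.1.1)) :
    (rgD L).getD p PySem.Dict.empty = PySem.Dict.empty := by
  refine PySem.Dict.getD_of_not_contains _ _ ?_
  cases hc : (rgD L).contains p
  · rfl
  · exact absurd ((contains_rgD L p).mp hc) hp

theorem contains_rgInner (L : List ((String × String) × Int)) (p a : String) :
    (rgInner L p).contains a = true ↔ (p, a) ∈ L.map (fun kv => kv.1) := by
  rw [PySem.Dict.contains_iff_mem_keys]
  simp only [rgInner, PySem.Dict.keys, List.map_map]
  constructor
  · intro hm
    rcases List.mem_map.mp hm with ⟨kv, hkv, hkva⟩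
    obtain ⟨hkvL, h1b⟩ := List.mem_filter.mp hkv
    have h1 : kv.1.1 = p := by simpa using h1b
    have h2 : kv.1.2 = a := by simpa [Function.comp] using hkva
    refine List.mem_map.mpr ⟨kv, hkvL, ?_⟩
    exact Prod.ext_iff.mpr ⟨h1, h2⟩
  · intro hm
    rcases List.mem_map.mp hm with ⟨kv, hkvL, hkv1⟩
    refine List.mem_map.mpr ⟨kv, List.mem_filter.mpr ⟨hkvL, by simp [hkv1]⟩, ?_⟩
    simp [Function.comp, hkv1]

theorem rgInner_append_ne (L : List ((String × String) × Int))
    (kv : (String × String) × Int) (p' : String) (hne : p' ≠ kv.1.1) :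
    rgInner (L ++ [kv]) p' = rgInner L p' := by
  have : (kv.1.1 == p') = false := beq_eq_false_iff_ne.mpr (Ne.symm hne)
  simp [rgInner, List.filter_append, this]

theorem rgInner_eq_empty (L : List ((String × String) × Int)) (p : String)
    (hp : p ∉ L.map (fun kv => kv.1.1)) : rgInner L p = PySem.Dict.empty := by
  apply PySem.Dict.ext
  simp only [rgInner]
  rw [List.filter_eq_nil_iff.mpr ?_]
  · rfl
  · intro kv hkv
    simp only [beq_iff_eq]
    intro h1
    exact hp (List.mem_map.mpr ⟨kv, hkv, h1⟩)

theorem rgInner_step (L : List ((String × String) × Int)) (p a : String) (v : Int)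
    (hpa : (p, a) ∉ L.map (fun kv => kv.1)) :
    (rgInner L p).insert a v = rgInner (L ++ [((p, a), v)]) p := by
  have hca : (rgInner L p).contains a = false := by
    cases hc : (rgInner L p).contains a
    · rfl
    · exact absurd ((contains_rgInner L p a).mp hc) hpa
  apply PySem.Dict.ext
  rw [PySem.Dict.items_insert_of_not_contains _ _ hca]
  simp [rgInner, List.filter_append]

theorem regroup_canon (L : List ((String × String) × Int)) (h : (L.map (·.1)).Nodup) :
    L.foldl stepR PySem.Dict.empty = rgD L := by
  induction L using List.reverseRecOn with
  | nil => rfl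
  | append_singleton L kv ih =>
    obtain ⟨⟨p, a⟩, v⟩ := kv
    rw [List.map_append] at h
    obtain ⟨hL, _, hdisj⟩ := List.nodup_append.mp h
    have hpa : (p, a) ∉ L.map (·.1) := fun hc => hdisj _ hc _ (by simp) rfl
    rw [List.foldl_append, List.foldl_cons, List.foldl_nil, ih hL]
    show (rgD L).insert p ((rgD L).getD p PySem.Dict.empty |>.insert a v) = rgD (L ++ [((p, a), v)])
    by_cases hp : p ∈ L.map (fun kv => kv.1.1)
    · rw [getD_rgD_mem L p hp, rgInner_step L p a v hpa]
      apply PySem.Dict.ext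
      rw [PySem.Dict.items_insert_of_contains _ _ ((contains_rgD L p).mpr hp)]
      simp only [rgD]
      rw [show PySem.Set.ofList ((L ++ [((p, a), v)]).map (fun kv => kv.1.1))
          = PySem.Set.ofList (L.map (fun kv => kv.1.1)) from by
        simp only [List.map_append, List.map_cons, List.map_nil]
        rw [PySem.Set.ofList_append_singleton (L.map (fun kv => kv.1.1)) p,
          PySem.Set.add_of_mem ((PySem.Set.mem_ofList _ _).mpr hp)], List.map_map]
      apply List.map_congr_left
      intro p' hp'
      by_cases hpp : p' = p
      · subst hpp
        simp
      · have : ((p', rgInner L p').1 == p) = false := beq_eq_false_iff_ne.mpr hpp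
        simp only [Function.comp_apply, this, Bool.false_eq_true, if_false]
        rw [rgInner_append_ne L ((p, a), v) p' hpp]
    · rw [getD_rgD_not L p hp, ← rgInner_eq_empty L p hp, rgInner_step L p a v hpa]
      apply PySem.Dict.ext
      rw [PySem.Dict.items_insert_of_not_contains _ _ (by
        cases hc : (rgD L).contains p
        · rfl
        · exact absurd ((contains_rgD L p).mp hc) hp)]
      simp only [rgD]
      rw [show PySem.Set.ofList ((L ++ [((p, a), v)]).map (fun kv => kv.1.1))
          = PySem.Set.ofList (L.map (fun kv => kv.1.1)) ++ [p] from by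
        simp only [List.map_append, List.map_cons, List.map_nil]
        rw [PySem.Set.ofList_append_singleton (L.map (fun kv => kv.1.1)) p,
          PySem.Set.add_of_not_mem (fun hc => hp ((PySem.Set.mem_ofList _ _).mp hc))],
        List.map_append]
      congr 1
      apply List.map_congr_left
      intro p' hp'
      have hp'm : p' ∈ L.map (fun kv => kv.1.1) := (PySem.Set.mem_ofList _ _).mp hp'
      have hpp : p' ≠ p := fun hc => hp (hc ▸ hp'm)
      rw [rgInner_append_ne L ((p, a), v) p' hpp]

theorem ofList_map_ofList {α β : Type} [BEq α] [LawfulBEq α] [BEq β] [LawfulBEq β]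
    (xs : List α) (f : α → β) :
    PySem.Set.ofList ((PySem.Set.ofList xs).map f) = PySem.Set.ofList (xs.map f) := by
  induction xs using List.reverseRecOn with
  | nil => rfl
  | append_singleton xs x ih =>
    by_cases hx : x ∈ xs
    · rw [PySem.Set.ofList_append_singleton, PySem.Set.add_of_mem
        (by rwa [PySem.Set.mem_ofList]), ih, List.map_append, List.map_singleton,
        PySem.Set.ofList_append_singleton, PySem.Set.add_of_mem
        (by rw [PySem.Set.mem_ofList]; exact List.mem_map_of_mem hx)]
    · rw [PySem.Set.ofList_append_singleton, PySem.Set.add_of_not_mem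
        (by rwa [PySem.Set.mem_ofList]), List.map_append, List.map_singleton,
        PySem.Set.ofList_append_singleton, ih, List.map_append, List.map_singleton,
        PySem.Set.ofList_append_singleton]

theorem altD_canon (dAtiv : List (String × List (String × List (Int × Int)))) :
    (cntB dAtiv).items.foldl stepR PySem.Dict.empty = canonD (ev dAtiv) := by
  rw [cntB_eq, PySem.Dict.items_counter]
  generalize ev dAtiv = es
  rw [regroup_canon _ (by
    simp only [List.map_map]
    have : ((fun kv => kv.1) ∘ fun k => ((k : String × String), (List.count k es : Int))) = id := rfl
    rw [this, List.map_id]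
    exact PySem.Set.nodup_ofList es)]
  apply PySem.Dict.ext
  simp only [rgD, canonD, rgInner, innerD, innerItems, List.map_map, List.filter_map,
    Function.comp_def]
  rw [show PySem.Set.ofList ((PySem.Set.ofList es).map fun k => k.1)
      = PySem.Set.ofList (es.map Prod.fst) from by
    have := ofList_map_ofList es Prod.fst
    simpa [Function.comp_def] using this]

-- ===== VERDICT (by name: the statement is the Claim_ definition above) =====
theorem criaDic_spec : Claim_equal_criaDic := by
  intro dAtiv _
  unfold Spec_criaDic criaDic criaDic_alt
  rw [foldA_eq dAtiv PySem.Dict.empty ⟨by intro p hp; simp [PySem.Dict.contains_empty] at hp, by simp [PySem.Dict.keys_empty]⟩]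
  rw [foldE_canon, show ((cntB dAtiv).items.foldl (fun dP kv =>
      dP.insert kv.1.1 ((dP.getD kv.1.1 PySem.Dict.empty).insert kv.1.2 kv.2))
    PySem.Dict.empty) = (cntB dAtiv).items.foldl stepR PySem.Dict.empty from rfl, altD_canon]
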